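-- pv_equiv track=rewrite | github.com/MrGmo/codeWars-Python | 7kyu/bingo-or-not.py | bingo
-- ===== SOURCE A (Python) =====
-- def bingo(arr):
--     letters = []
--     result = ''
--     for num in arr:
--         letters.append(chr(num+64))
--     for char in letters:
--         if char in 'BINGO':
--             result += char
--     sorted_bingo = ''.join(sorted(list(set(sorted(result)))))
--     return 'WIN' if sorted_bingo == 'BGINO' else 'LOSE'
-- ===== SOURCE B (Python) =====
-- def bingo(arr):
--     # Iterate over the target letters and scan the array for each required code.
--     return 'WIN' if all(ord(c) - 64 in arr for c in 'BINGO') else 'LOSE'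
-- ===== Notes on version B (the rewrite author's own statement) =====
-- stated objective: simpler
-- what changed: B inverts the iteration: instead of mapping every element to a letter and building a collection to sort/dedup/compare, it loops over the five target letters of 'BINGO' and checks each required code for membership in the input, with no chr mapping or collection at all.
import Mathlib
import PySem

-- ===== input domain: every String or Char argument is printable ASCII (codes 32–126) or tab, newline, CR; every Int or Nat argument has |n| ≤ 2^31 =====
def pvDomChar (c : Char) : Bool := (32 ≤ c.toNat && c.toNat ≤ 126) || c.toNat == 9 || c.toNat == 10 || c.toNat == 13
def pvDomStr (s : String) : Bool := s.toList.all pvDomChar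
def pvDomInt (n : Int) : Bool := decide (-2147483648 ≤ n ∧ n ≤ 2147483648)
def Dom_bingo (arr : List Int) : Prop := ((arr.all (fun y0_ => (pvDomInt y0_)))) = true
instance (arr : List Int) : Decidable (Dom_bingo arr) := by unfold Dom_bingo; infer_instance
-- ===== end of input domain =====

-- B inverts the iteration: it loops over the five target letters of 'BINGO' and tests each
-- required code for membership in arr, instead of mapping every element to a letter and
-- building/sorting/deduplicating a collection (objective: simpler). Characters are modelled
-- by their code points.

-- ===== PORT A =====
def bingo (arr : List Int) : String :=
  -- letters = [chr(num+64) for num in arr], as code points (chr total under Pre_bingo)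
  let letters : List Int := arr.foldl (fun acc num => acc ++ [num + 64]) []
  -- result += char for char in letters if char in 'BINGO'
  let result : List Int :=
    letters.foldl (fun acc ch => if ch ∈ ([66, 73, 78, 71, 79] : List Int) then acc ++ [ch] else acc) []
  -- ''.join(sorted(list(set(sorted(result))))); the set is sorted afterwards, so hash order is irrelevant
  let sorted_bingo : List Int :=
    PySem.List.sorted (PySem.Set.ofList (PySem.List.sorted result (fun x => x) false)) (fun x => x) false
  if sorted_bingo = [66, 71, 73, 78, 79] then "WIN" else "LOSE"

-- ===== PORT B =====
def bingo_alt (arr : List Int) : String :=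
  -- all(ord(c) - 64 in arr for c in 'BINGO'); 'BINGO' as code points
  if ([66, 73, 78, 71, 79] : List Int).all (fun c => decide ((c - 64) ∈ arr)) then "WIN" else "LOSE"

-- ===== PRECONDITION & SPEC =====
-- Pre_ excludes exactly the inputs where chr(num+64) raises ValueError (num+64 outside range(0x110000)).
def Pre_bingo (arr : List Int) : Prop := ∀ n ∈ arr, -64 ≤ n ∧ n + 64 < 1114112
instance (arr : List Int) : Decidable (Pre_bingo arr) := by unfold Pre_bingo; infer_instance
def pvWitness_bingo : List Int := [2, 9, 14, 7, 15]

def Spec_bingo (arr : List Int) (out : String) : Prop := out = bingo_alt arr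
instance (arr : List Int) (out : String) : Decidable (Spec_bingo arr out) := by unfold Spec_bingo; infer_instance

-- ===== CLAIM (what is proved, stated in full; the proofs are below) =====
def Claim_equal_bingo : Prop := ∀ (arr : List Int), Dom_bingo arr → Pre_bingo arr → Spec_bingo arr (bingo arr)

-- ===== LEMMAS AND PROOFS =====

-- A's sorted-dedup chain equals the canonical list iff every BINGO code occurs among the codes.
theorem sorted_dedup_eq_iff (r : List Int) (hsub : ∀ x ∈ r, x ∈ ([66, 73, 78, 71, 79] : List Int)) :
    PySem.List.sorted (PySem.Set.ofList (PySem.List.sorted r (fun x => x) false)) (fun x => x) false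
      = [66, 71, 73, 78, 79] ↔ ∀ c ∈ ([66, 73, 78, 71, 79] : List Int), c ∈ r := by
  constructor
  · intro h c hc
    have : c ∈ PySem.List.sorted (PySem.Set.ofList (PySem.List.sorted r (fun x => x) false)) (fun x => x) false := by
      rw [h]; fin_cases hc <;> simp
    simpa [PySem.List.mem_sorted, PySem.Set.mem_ofList] using this
  · intro hall
    apply PySem.List.sorted_eq_of_perm_of_pairwise_lt
    · rw [List.perm_ext_iff_of_nodup (by decide) (PySem.Set.nodup_ofList _)]
      intro a
      simp only [PySem.Set.mem_ofList, PySem.List.mem_sorted]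
      constructor
      · intro ha
        have : a ∈ ([66, 73, 78, 71, 79] : List Int) := by
          fin_cases ha <;> simp
        exact hall a this
      · intro ha
        have := hsub a ha
        fin_cases this <;> simp
    · decide

theorem result_eq_filter (letters : List Int) :
    letters.foldl (fun acc ch => if ch ∈ ([66, 73, 78, 71, 79] : List Int) then acc ++ [ch] else acc) []
      = letters.filter (fun ch => decide (ch ∈ ([66, 73, 78, 71, 79] : List Int))) := by
  rw [show (fun (acc : List Int) ch => if ch ∈ ([66, 73, 78, 71, 79] : List Int) then acc ++ [ch] else acc)
      = fun acc ch => if (fun c => decide (c ∈ ([66, 73, 78, 71, 79] : List Int))) ch = true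
          then acc ++ [id ch] else acc from by funext acc ch; simp,
    PySem.List.foldl_append_if]
  simp

-- ===== VERDICT (by name: the statement is the Claim_ definition above) =====
theorem bingo_spec : Claim_equal_bingo := by
  intro arr _ _
  show (if PySem.List.sorted (PySem.Set.ofList (PySem.List.sorted
        (List.foldl (fun acc ch => if ch ∈ ([66, 73, 78, 71, 79] : List Int) then acc ++ [ch] else acc) []
          (List.foldl (fun acc num => acc ++ [num + 64]) [] arr)) (fun x => x) false)) (fun x => x) false
        = [66, 71, 73, 78, 79] then "WIN" else "LOSE")
    = (if ([66, 73, 78, 71, 79] : List Int).all (fun c => decide ((c - 64) ∈ arr)) then "WIN" else "LOSE")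
  rw [PySem.List.foldl_append_singleton_eq_map, result_eq_filter]
  simp only [List.nil_append]
  set r : List Int := ((arr.map (fun n => n + 64)).filter
      (fun ch => decide (ch ∈ ([66, 73, 78, 71, 79] : List Int)))) with hr
  have hsub : ∀ x ∈ r, x ∈ ([66, 73, 78, 71, 79] : List Int) := by
    intro x hx
    rw [hr] at hx
    simpa using (List.of_mem_filter hx)
  have hiff : (([66, 73, 78, 71, 79] : List Int).all (fun c => decide ((c - 64) ∈ arr)) = true)
      ↔ ∀ c ∈ ([66, 73, 78, 71, 79] : List Int), c ∈ arr.map (fun n => n + 64) := by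
    simp only [List.all_eq_true, decide_eq_true_eq, List.mem_map]
    constructor
    · intro h c hc
      exact ⟨c - 64, h c hc, by ring⟩
    · intro h c hc
      obtain ⟨n, hn, he⟩ := h c hc
      have : c - 64 = n := by omega
      rwa [this]
  by_cases h : ∀ c ∈ ([66, 73, 78, 71, 79] : List Int), c ∈ arr.map (fun n => n + 64)
  · rw [if_pos (hiff.mpr h), if_pos]
    rw [sorted_dedup_eq_iff r hsub]
    intro c hc
    rw [hr, List.mem_filter]
    exact ⟨h c hc, by fin_cases hc <;> simp⟩
  · rw [if_neg (fun hh => h (hiff.mp hh)), if_neg]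
    rw [sorted_dedup_eq_iff r hsub]
    intro hall
    apply h
    intro c hc
    exact List.mem_of_mem_filter (hall c hc)
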